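-- pv_equiv track=rewrite | github.com/mn89h/dewpoint_code | readout/vis_cap_prx_mavg.py | get_indices_threshold
-- ===== SOURCE A (Python) =====
-- def get_indices_threshold(arr, threshold, below = True):
--     # Initialize sublist and indices
--     sublists = []
--     start = 0
--
--     if(below):
--         # Check each value against threshold
--         for i in range(1, len(arr)):
--             if arr[i] >= threshold and arr[i-1] < threshold:
--                 sublists.append([start, i])
--                 start = i
--
--         # Append final subarray
--         if arr[-1] < threshold:
--             sublists.append([start,-1])
--     else:
--         for i in range(1, len(arr)):
--             if arr[i] <= threshold and arr[i-1] > threshold: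
--                 sublists.append([start, i])
--                 start = i
--
--         if arr[-1] > threshold:
--             sublists.append([start,-1])
--
--     return sublists
-- ===== SOURCE B (Python) =====
-- def get_indices_threshold(arr, threshold, below = True):
--     # Build the result back-to-front: walk the array from the end toward the
--     # start, carrying the right boundary of the pending segment (None = no
--     # pending segment); each crossing closes the segment to its right.  The
--     # segments are collected in reverse and flipped once at the end.
--     if below:
--         tail = arr[-1] < threshold
--         def cross(i):
--             return arr[i] >= threshold and arr[i-1] < threshold
--     else:
--         tail = arr[-1] > threshold
--         def cross(i):
--             return arr[i] <= threshold and arr[i-1] > threshold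
--     rev = []
--     right = -1 if tail else None
--     for i in range(len(arr) - 1, 0, -1):
--         if cross(i):
--             if right is not None:
--                 rev.append([i, right])
--             right = i
--     if right is not None:
--         rev.append([0, right])
--     rev.reverse()
--     return rev
-- ===== Notes on version B (the rewrite author's own statement) =====
-- stated objective: alternative
-- what changed: B builds the segment list back-to-front: it scans the array from the last index down to 1, carrying an Option right-boundary of the pending segment, collecting segments in reverse order (one final reverse), instead of A's forward loop that carries a mutable start and appends segments left-to-right.
import Mathlib
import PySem

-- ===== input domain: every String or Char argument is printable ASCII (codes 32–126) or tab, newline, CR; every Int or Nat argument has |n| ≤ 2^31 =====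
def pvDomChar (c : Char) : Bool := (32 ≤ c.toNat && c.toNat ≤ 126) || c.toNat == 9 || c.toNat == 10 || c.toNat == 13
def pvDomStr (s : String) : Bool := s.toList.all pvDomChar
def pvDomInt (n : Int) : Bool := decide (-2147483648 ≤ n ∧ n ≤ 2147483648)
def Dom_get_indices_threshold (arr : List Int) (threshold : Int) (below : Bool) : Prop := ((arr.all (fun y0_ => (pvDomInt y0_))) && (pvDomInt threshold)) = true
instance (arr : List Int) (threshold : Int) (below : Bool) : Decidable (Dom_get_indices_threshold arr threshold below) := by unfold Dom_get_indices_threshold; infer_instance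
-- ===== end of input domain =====

-- B builds the segment list back-to-front (scan from the last index down, carrying an
-- Option right-boundary and prepending segments) instead of A's forward loop with a
-- mutable start; same task, same O(n) cost. Neither program mutates its arguments.

-- ===== PORT A =====
-- literal port of A: one forward loop over range(1, len(arr)) carrying (sublists, start);
-- arr[i] / arr[-1] via pyGetD, exact because every produced index is in range and Pre_
-- excludes the empty list (where arr[-1] raises IndexError).
def get_indices_threshold (arr : List Int) (threshold : Int) (below : Bool) : List (List Int) :=
  if below then
    let st := (PySem.List.pyRange 1 arr.length 1).foldl
      (fun (st : List (List Int) × Int) i =>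
        if PySem.List.pyGetD arr i 0 ≥ threshold ∧ PySem.List.pyGetD arr (i-1) 0 < threshold
        then (st.1 ++ [[st.2, i]], i) else st) ([], 0)
    if PySem.List.pyGetD arr (-1) 0 < threshold then st.1 ++ [[st.2, -1]] else st.1
  else
    let st := (PySem.List.pyRange 1 arr.length 1).foldl
      (fun (st : List (List Int) × Int) i =>
        if PySem.List.pyGetD arr i 0 ≤ threshold ∧ PySem.List.pyGetD arr (i-1) 0 > threshold
        then (st.1 ++ [[st.2, i]], i) else st) ([], 0)
    if PySem.List.pyGetD arr (-1) 0 > threshold then st.1 ++ [[st.2, -1]] else st.1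

-- ===== PORT B =====
-- literal port of Source B: tail and the crossing test chosen by `below`, then a countdown
-- loop over range(len(arr)-1, 0, -1) carrying (rev, right : Option Int); rev.append(…) is
-- an append at the end, [0, right] is appended iff right is not None, then rev.reverse().
def get_indices_threshold_alt (arr : List Int) (threshold : Int) (below : Bool) : List (List Int) :=
  let tail :=
    if below then decide (PySem.List.pyGetD arr (-1) 0 < threshold)
    else decide (PySem.List.pyGetD arr (-1) 0 > threshold)
  let cross : Int → Prop := fun i =>
    if below then PySem.List.pyGetD arr i 0 ≥ threshold ∧ PySem.List.pyGetD arr (i-1) 0 < threshold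
    else PySem.List.pyGetD arr i 0 ≤ threshold ∧ PySem.List.pyGetD arr (i-1) 0 > threshold
  let st := (PySem.List.pyRange ((arr.length : Int) - 1) 0 (-1)).foldl
    (fun (st : List (List Int) × Option Int) i =>
      if cross i then
        ((match st.2 with | some r => st.1 ++ [[i, r]] | none => st.1), some i)
      else st)
    ([], if tail then some (-1) else none)
  (match st.2 with
   | some r => st.1 ++ [[0, r]]
   | none => st.1).reverse

-- ===== PRECONDITION & SPEC =====
-- Pre_ excludes only the empty list, on which both A and B raise IndexError at arr[-1].
def Pre_get_indices_threshold (arr : List Int) (threshold : Int) (below : Bool) : Prop := arr ≠ []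
instance (arr : List Int) (threshold : Int) (below : Bool) : Decidable (Pre_get_indices_threshold arr threshold below) := by unfold Pre_get_indices_threshold; infer_instance
def pvWitness_get_indices_threshold : List Int × Int × Bool := ([1, 5, 2, 6, 0], 4, true)

def Spec_get_indices_threshold (arr : List Int) (threshold : Int) (below : Bool) (out : List (List Int)) : Prop := out = get_indices_threshold_alt arr threshold below
instance (arr : List Int) (threshold : Int) (below : Bool) (out : List (List Int)) : Decidable (Spec_get_indices_threshold arr threshold below out) := by unfold Spec_get_indices_threshold; infer_instance

-- ===== CLAIM (what is proved, stated in full; the proofs are below) =====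
def Claim_equal_get_indices_threshold : Prop := ∀ (arr : List Int) (threshold : Int) (below : Bool), Dom_get_indices_threshold arr threshold below → Pre_get_indices_threshold arr threshold below → Spec_get_indices_threshold arr threshold below (get_indices_threshold arr threshold below)

-- ===== LEMMAS AND PROOFS =====

-- A's forward loop, from any state, produces the consecutive-boundary segments of the
-- filtered crossing list, and its final `start` is the last boundary.
theorem fold_seg (p : Int → Prop) [DecidablePred p] (is : List Int) :
    ∀ (subs : List (List Int)) (start : Int),
      is.foldl (fun (st : List (List Int) × Int) i => if p i then (st.1 ++ [[st.2, i]], i) else st) (subs, start)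
      = (subs ++ ((start :: is.filter (fun i => decide (p i))).zip
                   (is.filter (fun i => decide (p i)))).map (fun q => [q.1, q.2]),
         (is.filter (fun i => decide (p i))).getLastD start) := by
  induction is with
  | nil => intro subs start; simp
  | cons i is ih =>
    intro subs start
    by_cases hp : p i
    · simp only [List.foldl_cons, if_pos hp, List.filter_cons, decide_eq_true hp, if_true]
      rw [ih]
      simp only [List.zip_cons_cons, List.map_cons, List.getLastD_cons, List.cons_append,
        List.nil_append, List.append_assoc]
    · simp only [List.foldl_cons, if_neg hp, List.filter_cons]
      rw [ih]
      simp [hp]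

-- B's backward loop = a foldr over the ascending index list; its closed form:
-- segments are consecutive crossings zipped (extended by r0 on the right), and the
-- final `right` is the first crossing, or r0 if there is none.
theorem foldr_rtl (p : Int → Prop) [DecidablePred p] (is : List Int) (r0 : Option Int) :
    is.foldr (fun i (st : List (List Int) × Option Int) =>
        if p i then ((match st.2 with | some r => st.1 ++ [[i, r]] | none => st.1), some i) else st)
      ([], r0)
    = ((((is.filter (fun i => decide (p i))).zip
          ((is.filter (fun i => decide (p i))).drop 1 ++ (match r0 with | some r => [r] | none => []))).map
        (fun q => [q.1, q.2])).reverse,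
       match (is.filter (fun i => decide (p i))).head? with | some c => some c | none => r0) := by
  induction is with
  | nil => simp
  | cons i is ih =>
    by_cases hp : p i
    · simp only [List.foldr_cons, ih, List.filter_cons, decide_eq_true hp, if_pos hp]
      cases hcs : is.filter (fun i => decide (p i)) with
      | nil => cases r0 <;> simp
      | cons c cs => simp
    · simp only [List.foldr_cons, ih, List.filter_cons, hp, decide_false, if_false,
        Bool.false_eq_true]

-- zipping (a :: cs) against (cs ++ [z]) appends the (last boundary, z) pair.
theorem zip_cons_append (cs : List Int) (a z : Int) :
    (a :: cs).zip (cs ++ [z]) = (a :: cs).zip cs ++ [(cs.getLastD a, z)] := by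
  induction cs generalizing a with
  | nil => simp
  | cons c cs ih =>
    simp only [List.cons_append, List.zip_cons_cons, ih c, List.getLastD_cons]

theorem getD_getLast_cons (c a : Int) (cs : List Int) :
    (c :: cs).getLast?.getD a = cs.getLast?.getD c := by
  cases cs with
  | nil => simp
  | cons x xs =>
    rcases h : (x :: xs).getLast? with _ | y
    · simp at h
    · simp [List.getLast?_cons_cons, h]

-- the two closed forms agree, for every crossing list and tail condition.
theorem assemble_eq (cs : List Int) (P : Prop) [Decidable P] :
    (match (match cs.head? with
            | some c => some c
            | none => (if P then some (-1) else none : Option Int)) with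
     | some r => ((cs.zip (cs.drop 1 ++ (match (if P then some (-1) else none : Option Int) with
                    | some r => [r] | none => []))).map (fun (q : Int × Int) => [q.1, q.2])).reverse ++ [[(0:Int), r]]
     | none => ((cs.zip (cs.drop 1 ++ (match (if P then some (-1) else none : Option Int) with
                    | some r => [r] | none => []))).map (fun (q : Int × Int) => [q.1, q.2])).reverse).reverse
    = (if P
       then (((0:Int) :: cs).zip cs).map (fun (q : Int × Int) => [q.1, q.2]) ++ [[cs.getLastD 0, -1]]
       else (((0:Int) :: cs).zip cs).map (fun (q : Int × Int) => [q.1, q.2])) := by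
  by_cases hP : P <;> cases cs <;> simp [hP, zip_cons_append, getD_getLast_cons]

theorem get_indices_threshold_eq (arr : List Int) (threshold : Int) (below : Bool) :
    get_indices_threshold arr threshold below = get_indices_threshold_alt arr threshold below := by
  unfold get_indices_threshold get_indices_threshold_alt
  have hrev : PySem.List.pyRange ((arr.length : Int) - 1) 0 (-1)
      = (PySem.List.pyRange 1 (arr.length) 1).reverse := by
    rw [PySem.List.pyRange_neg_one_eq_reverse]; norm_num
  cases below <;>
    simp only [if_true, if_false, Bool.false_eq_true, hrev, List.foldl_reverse,
      fold_seg, foldr_rtl, List.nil_append, assemble_eq, decide_eq_true_eq]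

-- ===== VERDICT (by name: the statement is the Claim_ definition above) =====
theorem get_indices_threshold_spec : Claim_equal_get_indices_threshold := by
  intro arr threshold below _ _
  exact get_indices_threshold_eq arr threshold below
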